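-- pv_equiv track=rewrite | github.com/acselp/Laboratoare_PI | Laboratoare/Lab2/main.py | friend_nums
-- ===== SOURCE A (Python) =====
-- def sum_divisors(_n):
--     s = 0
--     for i in range(1, _n + 1):
--         if _n % i == 0:
--             s = s + i
--     return s
--
-- def friend_nums(a, b):
--     b = b + 1
--     d = {}
--     res = []
--
--     for i in range(a, b):
--         d[i] = sum_divisors(i) # Dictionarul cu suma divizorilor pentru fiecare numar din intervalul [a, b]
--
--     for i in range(a, b):
--         for j in range(a, b):
--             if i == j:  # Excludem elementele cu valorile tuplului identice
--                 continue
--             elif res.__contains__((i, j)) or res.__contains__((j, i)):  # Excludem tuplurile cu elementele asemanatoare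
--                 continue
--             elif d[i] == d[j]:
--                 res.append((i, j))
--     return res
-- ===== SOURCE B (Python) =====
-- def friend_nums(a, b):
--     # Divisor sums via the sqrt-pairing loop, computed once per number; pairs are
--     # emitted by a triangular scan in lex order, so no membership scans are needed.
--     def sigma(n):
--         if n <= 0:
--             return 0
--         t = 0
--         k = 1
--         while k * k <= n:
--             if n % k == 0:
--                 t += k
--                 q = n // k
--                 if q != k:
--                     t += q
--             k += 1
--         return t
--
--     s = {n: sigma(n) for n in range(a, b + 1)}
--     return [(i, j)
--             for i in range(a, b + 1)
--             for j in range(i + 1, b + 1)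
--             if s[i] == s[j]]
-- ===== Notes on version B (the rewrite author's own statement) =====
-- stated objective: alternative
-- what changed: B computes each divisor sum by pairing divisors k and n//k with k ranging only while k*k <= n instead of scanning 1..n, and emits the pairs by a triangular lex-order scan (j from i+1) instead of A's full square scan deduplicated with __contains__ searches over the growing result list.
import Mathlib
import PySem

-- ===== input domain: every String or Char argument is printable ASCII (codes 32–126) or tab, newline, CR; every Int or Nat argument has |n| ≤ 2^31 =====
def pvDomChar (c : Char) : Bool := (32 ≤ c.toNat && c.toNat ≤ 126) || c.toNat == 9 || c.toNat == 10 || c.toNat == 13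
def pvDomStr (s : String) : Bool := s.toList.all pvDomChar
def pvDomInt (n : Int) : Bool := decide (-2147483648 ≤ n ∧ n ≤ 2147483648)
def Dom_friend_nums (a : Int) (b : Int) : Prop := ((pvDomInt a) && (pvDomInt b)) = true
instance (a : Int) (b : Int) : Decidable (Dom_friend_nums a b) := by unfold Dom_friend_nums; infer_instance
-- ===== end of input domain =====

-- B computes divisor sums by the sqrt-pairing loop instead of A's 1..n scan, and emits
-- pairs by a triangular lex-order scan instead of A's square scan with `__contains__` dedup.

-- ===== PORT A =====
def sum_divisors (n : Int) : Int :=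
  (PySem.List.pyRange 1 (n + 1) 1).foldl
    (fun s i => if PySem.Int.mod n i = 0 then s + i else s) 0

def friend_nums (a : Int) (b : Int) : List (Int × Int) :=
  let c := b + 1
  let d : PySem.Dict Int Int :=
    (PySem.List.pyRange a c 1).foldl (fun d i => d.insert i (sum_divisors i)) PySem.Dict.empty
  (PySem.List.pyRange a c 1).foldl (fun res i =>
    (PySem.List.pyRange a c 1).foldl (fun res j =>
      if i == j then res
      else if res.contains (i, j) || res.contains (j, i) then res
      else if d.getD i 0 == d.getD j 0 then res ++ [(i, j)]
      else res) res) []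

-- ===== PORT B =====
-- the `while k * k <= n` loop of Source B's sigma
def sigmaAux (n : Int) (k : Int) (t : Int) : Int :=
  if h : k * k ≤ n then
    sigmaAux n (k + 1)
      (if PySem.Int.mod n k = 0 then
        (let q := PySem.Int.floordiv n k
         if q ≠ k then t + k + q else t + k)
       else t)
  else t
termination_by (n + 1 - k).toNat
decreasing_by
  have hk : k ≤ n := by nlinarith [sq_nonneg (k - 1)]
  omega

def sigma (n : Int) : Int := if n ≤ 0 then 0 else sigmaAux n 1 0

def friend_nums_alt (a : Int) (b : Int) : List (Int × Int) :=
  let s : PySem.Dict Int Int :=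
    (PySem.List.pyRange a (b + 1) 1).foldl (fun d m => d.insert m (sigma m)) PySem.Dict.empty
  (PySem.List.pyRange a (b + 1) 1).flatMap (fun i =>
    ((PySem.List.pyRange (i + 1) (b + 1) 1).filter (fun j => s.getD i 0 == s.getD j 0)).map
      (fun j => (i, j)))

-- ===== PRECONDITION & SPEC =====
def Spec_friend_nums (a : Int) (b : Int) (out : List (Int × Int)) : Prop := out = friend_nums_alt a b
instance (a : Int) (b : Int) (out : List (Int × Int)) : Decidable (Spec_friend_nums a b out) := by unfold Spec_friend_nums; infer_instance

-- ===== CLAIM (what is proved, stated in full; the proofs are below) =====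
def Claim_equal_friend_nums : Prop := ∀ (a : Int) (b : Int), Dom_friend_nums a b → Spec_friend_nums a b (friend_nums a b)

-- ===== LEMMAS AND PROOFS =====

-- dict built by inserting f i for each key i of a list: lookup of a listed key gives f i
theorem getD_foldl_insert_fun_of_not_mem (l : List Int) (f : Int → Int) (d : PySem.Dict Int Int)
    (x : Int) (hx : x ∉ l) :
    (l.foldl (fun d i => d.insert i (f i)) d).getD x 0 = d.getD x 0 := by
  induction l generalizing d with
  | nil => rfl
  | cons y t ih =>
    simp only [List.mem_cons, not_or] at hx
    simp only [List.foldl_cons]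
    rw [ih _ hx.2, PySem.Dict.getD_insert_of_ne _ _ _ hx.1]

theorem getD_foldl_insert_fun (l : List Int) (f : Int → Int) (d : PySem.Dict Int Int)
    (x : Int) (hx : x ∈ l) :
    (l.foldl (fun d i => d.insert i (f i)) d).getD x 0 = f x := by
  induction l generalizing d with
  | nil => cases hx
  | cons y t ih =>
    simp only [List.foldl_cons]
    by_cases hxt : x ∈ t
    · exact ih _ hxt
    · have hxy : x = y := by
        rcases List.mem_cons.mp hx with h | h
        · exact h
        · exact absurd h hxt
      subst hxy
      rw [getD_foldl_insert_fun_of_not_mem t f _ x hxt, PySem.Dict.getD_insert_self]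

-- fold that leaves a FIXED accumulator unchanged at every listed element
theorem foldl_fixed {α β : Type} (l : List α) (f : β → α → β) (acc : β)
    (h : ∀ x ∈ l, f acc x = acc) : l.foldl f acc = acc := by
  induction l with
  | nil => rfl
  | cons y t ih =>
    simp only [List.foldl_cons, h y (List.mem_cons_self)]
    exact ih (fun x hx => h x (List.mem_cons_of_mem _ hx))

-- the triangular rows of pairs with equal g-value
def triRow (g : Int → Int) (c i : Int) : List (Int × Int) :=
  ((PySem.List.pyRange (i + 1) c 1).filter (fun j => g i == g j)).map (fun j => (i, j))

def triUpTo (g : Int → Int) (a c i : Int) : List (Int × Int) :=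
  (PySem.List.pyRange a i 1).flatMap (triRow g c)

-- the truncated row built so far in the inner loop
def rowUpTo (g : Int → Int) (i j : Int) : List (Int × Int) :=
  ((PySem.List.pyRange (i + 1) j 1).filter (fun y => g i == g y)).map (fun y => (i, y))

def stepA (g : Int → Int) (res : List (Int × Int)) (i j : Int) : List (Int × Int) :=
  if i == j then res
  else if res.contains (i, j) || res.contains (j, i) then res
  else if g i == g j then res ++ [(i, j)]
  else res

theorem mem_triUpTo (g : Int → Int) (a c i : Int) (x y : Int) :
    (x, y) ∈ triUpTo g a c i ↔ a ≤ x ∧ x < i ∧ x < y ∧ y < c ∧ g x = g y := by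
  simp only [triUpTo, triRow, List.mem_flatMap, List.mem_filter, List.mem_map,
    PySem.List.mem_pyRange_one, beq_iff_eq, Prod.mk.injEq]
  constructor
  · rintro ⟨x', ⟨h1, h2⟩, y', ⟨⟨h3, h4⟩, h5⟩, h6, h7⟩
    subst h6; subst h7
    exact ⟨h1, h2, by omega, h4, h5⟩
  · rintro ⟨h1, h2, h3, h4, h5⟩
    exact ⟨x, ⟨h1, h2⟩, y, ⟨⟨by omega, h4⟩, h5⟩, rfl, rfl⟩

theorem mem_rowUpTo (g : Int → Int) (i j : Int) (x y : Int) :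
    (x, y) ∈ rowUpTo g i j ↔ x = i ∧ i < y ∧ y < j ∧ g i = g y := by
  simp only [rowUpTo, List.mem_filter, List.mem_map, PySem.List.mem_pyRange_one,
    beq_iff_eq, Prod.mk.injEq]
  constructor
  · rintro ⟨y', ⟨⟨h1, h2⟩, h3⟩, h4, h5⟩
    subst h5
    exact ⟨h4.symm, by omega, h2, h3⟩
  · rintro ⟨rfl, h2, h3, h4⟩
    exact ⟨y, ⟨⟨by omega, h3⟩, h4⟩, rfl, rfl⟩

-- inner loop, part 2: over j ∈ [j0, c)
theorem inner_tail (g : Int → Int) (a c i : Int) (hi : a ≤ i) (hic : i < c) :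
    ∀ j0 : Int, i < j0 → j0 ≤ c →
    (PySem.List.pyRange j0 c 1).foldl (fun res j => stepA g res i j)
      (triUpTo g a c i ++ rowUpTo g i j0) = triUpTo g a c i ++ rowUpTo g i c := by
  suffices H : ∀ (m : Nat) (j0 : Int), (c - j0).toNat = m → i < j0 → j0 ≤ c →
      (PySem.List.pyRange j0 c 1).foldl (fun res j => stepA g res i j)
        (triUpTo g a c i ++ rowUpTo g i j0) = triUpTo g a c i ++ rowUpTo g i c by
    intro j0 h1 h2; exact H _ j0 rfl h1 h2
  intro m
  induction m with
  | zero =>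
    intro j0 hm h1 h2
    have hj : j0 = c := by omega
    subst hj
    rw [PySem.List.pyRange_one_eq_nil le_rfl]
    rfl
  | succ m ih =>
    intro j0 hm h1 h2
    have hj0c : j0 < c := by omega
    have hni : (i, j0) ∉ triUpTo g a c i ++ rowUpTo g i j0 := by
      intro hmem
      rcases List.mem_append.mp hmem with h | h
      · obtain ⟨_, h', _⟩ := (mem_triUpTo g a c i i j0).mp h; omega
      · obtain ⟨_, _, h', _⟩ := (mem_rowUpTo g i j0 i j0).mp h; omega
    have hni' : (j0, i) ∉ triUpTo g a c i ++ rowUpTo g i j0 := by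
      intro hmem
      rcases List.mem_append.mp hmem with h | h
      · obtain ⟨_, h', _⟩ := (mem_triUpTo g a c i j0 i).mp h; omega
      · obtain ⟨h', _⟩ := (mem_rowUpTo g i j0 j0 i).mp h; omega
    have hij : (i == j0) = false := by rw [beq_eq_false_iff_ne]; omega
    have hrow : rowUpTo g i (j0 + 1)
        = rowUpTo g i j0 ++ (if g i == g j0 then [(i, j0)] else []) := by
      rw [rowUpTo, rowUpTo, PySem.List.pyRange_one_succ_right (by omega : i + 1 ≤ j0),
        List.filter_append, List.map_append]
      by_cases hg : g i = g j0
      · simp [hg]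
      · have hb : (g i == g j0) = false := by rw [beq_eq_false_iff_ne]; exact hg
        simp [hb]
    have hnA : (i, j0) ∉ triUpTo g a c i := fun h => hni (List.mem_append.mpr (Or.inl h))
    have hnB : (i, j0) ∉ rowUpTo g i j0 := fun h => hni (List.mem_append.mpr (Or.inr h))
    have hnC : (j0, i) ∉ triUpTo g a c i := fun h => hni' (List.mem_append.mpr (Or.inl h))
    have hnD : (j0, i) ∉ rowUpTo g i j0 := fun h => hni' (List.mem_append.mpr (Or.inr h))
    have hstep : stepA g (triUpTo g a c i ++ rowUpTo g i j0) i j0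
        = triUpTo g a c i ++ rowUpTo g i (j0 + 1) := by
      rw [hrow]
      by_cases hg : g i = g j0
      · simp [stepA, hij, hg, hnA, hnB, hnC, hnD]
      · simp [stepA, hij, hg]
    rw [PySem.List.pyRange_one_cons hj0c, List.foldl_cons, hstep]
    exact ih (j0 + 1) (by omega) (by omega) (by omega)

-- one full pass of the inner loop
theorem inner_pass (g : Int → Int) (a c i : Int) (hi : a ≤ i) (hic : i < c) :
    (PySem.List.pyRange a c 1).foldl (fun res j => stepA g res i j) (triUpTo g a c i)
      = triUpTo g a c (i + 1) := by
  rw [PySem.List.pyRange_one_append a (i + 1) c (by omega) (by omega), List.foldl_append]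
  have h1 : (PySem.List.pyRange a (i + 1) 1).foldl (fun res j => stepA g res i j)
      (triUpTo g a c i) = triUpTo g a c i := by
    apply foldl_fixed
    intro j hj
    rw [PySem.List.mem_pyRange_one] at hj
    by_cases hij : i = j
    · simp [stepA, hij]
    · have hji : j < i := by omega
      by_cases hg : g j = g i
      · have hmem : (j, i) ∈ triUpTo g a c i :=
          (mem_triUpTo g a c i j i).mpr ⟨hj.1, hji, hji, hic, hg⟩
        simp [stepA, hij, hmem]
      · have hg' : ¬ g i = g j := fun e => hg e.symm
        simp [stepA, hij, hg']
  rw [h1]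
  have h0 : rowUpTo g i (i + 1) = [] := by
    rw [rowUpTo, PySem.List.pyRange_one_eq_nil le_rfl]; rfl
  have htail := inner_tail g a c i hi hic (i + 1) (by omega) (by omega)
  rw [h0, List.append_nil] at htail
  rw [htail]
  rw [triUpTo, triUpTo, PySem.List.pyRange_one_succ_right hi, List.flatMap_append]
  simp [triRow, rowUpTo]

-- the outer loop
theorem outer_loop (g : Int → Int) (a c : Int) :
    ∀ i : Int, a ≤ i → i ≤ c →
    (PySem.List.pyRange i c 1).foldl (fun res i' =>
        (PySem.List.pyRange a c 1).foldl (fun res j => stepA g res i' j) res)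
      (triUpTo g a c i) = triUpTo g a c c := by
  suffices H : ∀ (m : Nat) (i : Int), (c - i).toNat = m → a ≤ i → i ≤ c →
      (PySem.List.pyRange i c 1).foldl (fun res i' =>
          (PySem.List.pyRange a c 1).foldl (fun res j => stepA g res i' j) res)
        (triUpTo g a c i) = triUpTo g a c c by
    intro i h1 h2; exact H _ i rfl h1 h2
  intro m
  induction m with
  | zero =>
    intro i hm h1 h2
    have : i = c := by omega
    subst this
    rw [PySem.List.pyRange_one_eq_nil le_rfl]
    rfl
  | succ m ih =>
    intro i hm h1 h2
    have hic : i < c := by omega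
    rw [PySem.List.pyRange_one_cons hic, List.foldl_cons, inner_pass g a c i h1 hic]
    exact ih (i + 1) (by omega) (by omega) (by omega)

-- ===== the divisor-sum identity: sigma = sum_divisors =====

theorem Ico_cons (a b : Int) (h : a < b) :
    Finset.Ico a b = insert a (Finset.Ico (a + 1) b) := by
  ext x
  simp only [Finset.mem_Ico, Finset.mem_insert]
  omega

theorem sum_map_pyRange (f : Int → Int) (a b : Int) :
    ((PySem.List.pyRange a b 1).map f).sum = ∑ j ∈ Finset.Ico a b, f j := by
  suffices H : ∀ (m : Nat) (a : Int), (b - a).toNat = m →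
      ((PySem.List.pyRange a b 1).map f).sum = ∑ j ∈ Finset.Ico a b, f j by
    exact H _ a rfl
  intro m
  induction m with
  | zero =>
    intro a hm
    rw [PySem.List.pyRange_one_eq_nil (by omega), Finset.Ico_eq_empty (by omega)]
    rfl
  | succ m ih =>
    intro a hm
    have hab : a < b := by omega
    rw [PySem.List.pyRange_one_cons hab, List.map_cons, List.sum_cons,
      Ico_cons a b hab, Finset.sum_insert (by simp [Finset.mem_Ico])]
    rw [ih (a + 1) (by omega)]

theorem sum_divisors_eq (n : Int) : sum_divisors n = ∑ j ∈ ((Finset.Ico 1 (n + 1)).filter (fun j => PySem.Int.mod n j = 0)), j := by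
  rw [sum_divisors,
    PySem.List.foldl_congr_mem _ _
      (fun s i => s + (if PySem.Int.mod n i = 0 then i else 0)) _
      (fun acc x _ => by dsimp only; split_ifs <;> omega),
    PySem.List.foldl_add, sum_map_pyRange, Finset.sum_filter, zero_add]

theorem sigmaAux_eq (n : Int) (hn : 1 ≤ n) :
    ∀ (m : Nat) (k t : Int), (n + 1 - k).toNat = m → 1 ≤ k →
    sigmaAux n k t = t + ∑ j ∈ (((Finset.Ico 1 (n + 1)).filter (fun j => PySem.Int.mod n j = 0 ∧ j * j ≤ n))).filter (fun j => k ≤ j),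
        (j + if PySem.Int.floordiv n j = j then 0 else PySem.Int.floordiv n j) := by
  intro m
  induction m with
  | zero =>
    intro k t hm hk
    have hk2 : n + 1 ≤ k := by omega
    have hk3 : k ≤ k * k := le_mul_of_one_le_left (by omega) (by omega)
    have hkk : ¬ k * k ≤ n := by omega
    rw [sigmaAux, dif_neg hkk]
    have hemp : (((Finset.Ico 1 (n + 1)).filter (fun j => PySem.Int.mod n j = 0 ∧ j * j ≤ n))).filter (fun j => k ≤ j) = ∅ := by
      rw [Finset.filter_eq_empty_iff]
      intro x hx
      simp only [Finset.mem_filter, Finset.mem_Ico] at hx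
      omega
    rw [hemp, Finset.sum_empty, add_zero]
  | succ m ih =>
    intro k t hm hk
    by_cases hkk : k * k ≤ n
    · rw [sigmaAux, dif_pos hkk, ih (k + 1) _ (by omega) (by omega)]
      have hk3 : k ≤ k * k := le_mul_of_one_le_left (by omega) (by omega)
      have hkn : k ≤ n := by omega
      by_cases hd : PySem.Int.mod n k = 0
      · have hsplit : (((Finset.Ico 1 (n + 1)).filter (fun j => PySem.Int.mod n j = 0 ∧ j * j ≤ n))).filter (fun j => k ≤ j)
            = insert k ((((Finset.Ico 1 (n + 1)).filter (fun j => PySem.Int.mod n j = 0 ∧ j * j ≤ n))).filter (fun j => k + 1 ≤ j)) := by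
          ext x
          simp only [Finset.mem_insert, Finset.mem_filter, Finset.mem_Ico]
          constructor
          · rintro ⟨⟨⟨hb1, hb2⟩, hdv, hsq⟩, hkx⟩
            by_cases hxk : x = k
            · exact Or.inl hxk
            · exact Or.inr ⟨⟨⟨hb1, hb2⟩, hdv, hsq⟩, by omega⟩
          · rintro (rfl | ⟨⟨⟨hb1, hb2⟩, hdv, hsq⟩, hkx⟩)
            · exact ⟨⟨⟨by omega, by omega⟩, hd, hkk⟩, le_rfl⟩
            · exact ⟨⟨⟨hb1, hb2⟩, hdv, hsq⟩, by omega⟩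
        rw [hsplit, Finset.sum_insert (by
          simp only [Finset.mem_filter]
          rintro ⟨_, h⟩
          omega)]
        rw [if_pos hd]
        by_cases hq : PySem.Int.floordiv n k = k
        · rw [if_neg (by simp [hq]), if_pos hq]
          omega
        · rw [if_pos (by simp [hq]), if_neg hq]
          omega
      · have hsplit : (((Finset.Ico 1 (n + 1)).filter (fun j => PySem.Int.mod n j = 0 ∧ j * j ≤ n))).filter (fun j => k ≤ j)
            = (((Finset.Ico 1 (n + 1)).filter (fun j => PySem.Int.mod n j = 0 ∧ j * j ≤ n))).filter (fun j => k + 1 ≤ j) := by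
          ext x
          simp only [Finset.mem_filter, Finset.mem_Ico]
          constructor
          · rintro ⟨⟨⟨hb1, hb2⟩, hdv, hsq⟩, hkx⟩
            have hne : x ≠ k := fun e => hd (e ▸ hdv)
            exact ⟨⟨⟨hb1, hb2⟩, hdv, hsq⟩, by omega⟩
          · rintro ⟨hx, hkx⟩
            exact ⟨hx, by omega⟩
        rw [hsplit, if_neg hd]
    · rw [sigmaAux, dif_neg hkk]
      have hemp : (((Finset.Ico 1 (n + 1)).filter (fun j => PySem.Int.mod n j = 0 ∧ j * j ≤ n))).filter (fun j => k ≤ j) = ∅ := by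
        rw [Finset.filter_eq_empty_iff]
        intro x hx
        simp only [Finset.mem_filter, Finset.mem_Ico] at hx
        intro hkx
        obtain ⟨⟨hb1, _⟩, _, hsq⟩ := hx
        have h1 : k * k ≤ k * x := by
          apply mul_le_mul_of_nonneg_left hkx (by omega)
        have h2 : k * x ≤ x * x := by
          apply mul_le_mul_of_nonneg_right hkx (by omega)
        omega
      rw [hemp, Finset.sum_empty, add_zero]

theorem pairing (n : Int) (hn : 1 ≤ n) :
    ∑ j ∈ ((Finset.Ico 1 (n + 1)).filter (fun j => PySem.Int.mod n j = 0 ∧ j * j ≤ n)), (j + if PySem.Int.floordiv n j = j then 0 else PySem.Int.floordiv n j)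
      = ∑ j ∈ ((Finset.Ico 1 (n + 1)).filter (fun j => PySem.Int.mod n j = 0)), j := by
  have hmem : ∀ j ∈ ((Finset.Ico 1 (n + 1)).filter (fun j => PySem.Int.mod n j = 0 ∧ j * j ≤ n)), 0 < j := by
    intro j hj
    simp only [Finset.mem_filter, Finset.mem_Ico] at hj
    omega
  rw [Finset.sum_congr rfl (fun j hj => by
    rw [PySem.Int.floordiv_eq_ediv_of_pos (hmem j hj)])]
  have hsplit : ((Finset.Ico 1 (n + 1)).filter (fun j => PySem.Int.mod n j = 0)) = ((Finset.Ico 1 (n + 1)).filter (fun j => PySem.Int.mod n j = 0 ∧ j * j ≤ n)) ∪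
      (Finset.Ico 1 (n + 1)).filter (fun j => PySem.Int.mod n j = 0 ∧ ¬ j * j ≤ n) := by
    ext x
    simp only [Finset.mem_union, Finset.mem_filter, Finset.mem_Ico]
    tauto
  have hdisj : Disjoint (((Finset.Ico 1 (n + 1)).filter (fun j => PySem.Int.mod n j = 0 ∧ j * j ≤ n)))
      ((Finset.Ico 1 (n + 1)).filter (fun j => PySem.Int.mod n j = 0 ∧ ¬ j * j ≤ n)) := by
    rw [Finset.disjoint_left]
    intro x hx hx'
    simp only [Finset.mem_filter, Finset.mem_Ico] at hx hx'
    tauto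
  rw [hsplit, Finset.sum_union hdisj, Finset.sum_add_distrib]
  congr 1
  have hstep : ∀ j ∈ ((Finset.Ico 1 (n + 1)).filter (fun j => PySem.Int.mod n j = 0 ∧ j * j ≤ n)), (if n / j = j then 0 else n / j)
      = (if n / j ≠ j then n / j else 0) := by
    intro j _
    rcases eq_or_ne (n / j) j with h | h
    · rw [if_pos h, if_neg (by simp [h])]
    · rw [if_neg h, if_pos h]
  rw [Finset.sum_congr rfl hstep,
    ← Finset.sum_filter (fun j => n / j ≠ j) (fun j => n / j)]
  apply Finset.sum_nbij' (i := fun j => n / j) (j := fun j => n / j)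
  · intro x hx
    simp only [Finset.mem_filter, Finset.mem_Ico] at hx
    obtain ⟨⟨⟨hb1, hb2⟩, hmd, hsq⟩, hne⟩ := hx
    have hdv : x ∣ n := (PySem.Int.mod_eq_zero_iff_dvd n x).mp hmd
    have heq : n / x * x = n := Int.ediv_mul_cancel hdv
    have hq1 : 1 ≤ n / x := (Int.le_ediv_iff_mul_le (by omega)).mpr (by omega)
    have hqn : n / x ≤ n := Int.ediv_le_self x (by omega)
    have hxq : x ≤ n / x := le_of_mul_le_mul_right (by omega) (by omega : (0:Int) < x)
    have hcm : x * (n / x) = n / x * x := mul_comm x (n / x)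
    have hxq' : x < n / x := by
      rcases lt_or_eq_of_le hxq with h | h
      · exact h
      · exact absurd h.symm hne
    have hgt : ¬ (n / x) * (n / x) ≤ n := by
      have h1 : (n / x) * (x + 1) ≤ (n / x) * (n / x) :=
        mul_le_mul_of_nonneg_left (by omega) (by omega)
      have h2 : (n / x) * (x + 1) = n / x * x + n / x := by ring
      omega
    simp only [Finset.mem_filter, Finset.mem_Ico]
    refine ⟨⟨hq1, by omega⟩, ?_, hgt⟩
    exact (PySem.Int.mod_eq_zero_iff_dvd n (n / x)).mpr ⟨x, by omega⟩
  · intro x hx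
    simp only [Finset.mem_filter, Finset.mem_Ico] at hx
    obtain ⟨⟨hb1, hb2⟩, hmd, hsq⟩ := hx
    have hdv : x ∣ n := (PySem.Int.mod_eq_zero_iff_dvd n x).mp hmd
    have heq : n / x * x = n := Int.ediv_mul_cancel hdv
    have hq1 : 1 ≤ n / x := (Int.le_ediv_iff_mul_le (by omega)).mpr (by omega)
    have hcm : x * (n / x) = n / x * x := mul_comm x (n / x)
    have hqx : n / x < x := by
      by_contra hcon
      have hcon' : x ≤ n / x := by omega
      nlinarith [heq]
    have hsq' : (n / x) * (n / x) ≤ n := by nlinarith [heq, hqx, hq1]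
    have hinv : n / (n / x) = x := by
      have h0 : n / x ≠ 0 := by omega
      have h1 : n / x * x / (n / x) = x := Int.mul_ediv_cancel_left x h0
      rwa [heq] at h1
    simp only [Finset.mem_filter, Finset.mem_Ico]
    refine ⟨⟨⟨hq1, by omega⟩, ?_, hsq'⟩, by omega⟩
    exact (PySem.Int.mod_eq_zero_iff_dvd n (n / x)).mpr ⟨x, by omega⟩
  · intro x hx
    simp only [Finset.mem_filter, Finset.mem_Ico] at hx
    obtain ⟨⟨⟨hb1, hb2⟩, hmd, hsq⟩, hne⟩ := hx
    have hdv : x ∣ n := (PySem.Int.mod_eq_zero_iff_dvd n x).mp hmd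
    have heq : n / x * x = n := Int.ediv_mul_cancel hdv
    have hq1 : 1 ≤ n / x := (Int.le_ediv_iff_mul_le (by omega)).mpr (by omega)
    have h1 : n / x * x / (n / x) = x := Int.mul_ediv_cancel_left x (by omega)
    rw [heq] at h1
    exact h1
  · intro x hx
    simp only [Finset.mem_filter, Finset.mem_Ico] at hx
    obtain ⟨⟨hb1, hb2⟩, hmd, hsq⟩ := hx
    have hdv : x ∣ n := (PySem.Int.mod_eq_zero_iff_dvd n x).mp hmd
    have heq : n / x * x = n := Int.ediv_mul_cancel hdv
    have hq1 : 1 ≤ n / x := (Int.le_ediv_iff_mul_le (by omega)).mpr (by omega)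
    have h1 : n / x * x / (n / x) = x := Int.mul_ediv_cancel_left x (by omega)
    rw [heq] at h1
    exact h1
  · intro x hx
    rfl

theorem sigma_eq_sum_divisors (n : Int) : sigma n = sum_divisors n := by
  by_cases hn : n ≤ 0
  · rw [sigma, if_pos hn, sum_divisors, PySem.List.pyRange_one_eq_nil (by omega)]
    rfl
  · rw [sigma, if_neg hn,
      sigmaAux_eq n (by omega) (n + 1 - 1).toNat 1 0 rfl le_rfl, zero_add,
      Finset.filter_true_of_mem (fun x hx => by
        simp only [Finset.mem_filter, Finset.mem_Ico] at hx
        omega),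
      pairing n (by omega), sum_divisors_eq]

-- ===== assembling the verdict =====

-- ===== VERDICT (by name: the statement is the Claim_ definition above) =====
theorem friend_nums_spec : Claim_equal_friend_nums := by
  intro a b _
  show friend_nums a b = friend_nums_alt a b
  rw [friend_nums, friend_nums_alt]
  have hd : ∀ x ∈ PySem.List.pyRange a (b + 1) 1,
      ((PySem.List.pyRange a (b + 1) 1).foldl
        (fun d i => d.insert i (sum_divisors i)) PySem.Dict.empty).getD x 0
      = sum_divisors x :=
    fun x hx => getD_foldl_insert_fun _ _ _ x hx
  have hs : ∀ x ∈ PySem.List.pyRange a (b + 1) 1,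
      ((PySem.List.pyRange a (b + 1) 1).foldl
        (fun d m => d.insert m (sigma m)) PySem.Dict.empty).getD x 0
      = sigma x :=
    fun x hx => getD_foldl_insert_fun _ _ _ x hx
  have hL : (PySem.List.pyRange a (b + 1) 1).foldl (fun res i =>
      (PySem.List.pyRange a (b + 1) 1).foldl (fun res j =>
        if i == j then res
        else if res.contains (i, j) || res.contains (j, i) then res
        else if ((PySem.List.pyRange a (b + 1) 1).foldl
            (fun d i => d.insert i (sum_divisors i)) PySem.Dict.empty).getD i 0
          == ((PySem.List.pyRange a (b + 1) 1).foldl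
            (fun d i => d.insert i (sum_divisors i)) PySem.Dict.empty).getD j 0
          then res ++ [(i, j)]
        else res) res) []
      = (PySem.List.pyRange a (b + 1) 1).foldl (fun res i =>
          (PySem.List.pyRange a (b + 1) 1).foldl
            (fun res j => stepA sum_divisors res i j) res) [] := by
    apply PySem.List.foldl_congr_mem
    intro acc i hi
    apply PySem.List.foldl_congr_mem
    intro acc2 j hj
    rw [hd i hi, hd j hj]
    rfl
  rw [hL]
  have hR : (PySem.List.pyRange a (b + 1) 1).flatMap (fun i =>
      ((PySem.List.pyRange (i + 1) (b + 1) 1).filter (fun j =>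
        ((PySem.List.pyRange a (b + 1) 1).foldl
          (fun d m => d.insert m (sigma m)) PySem.Dict.empty).getD i 0
        == ((PySem.List.pyRange a (b + 1) 1).foldl
          (fun d m => d.insert m (sigma m)) PySem.Dict.empty).getD j 0)).map
        (fun j => (i, j)))
      = triUpTo sigma a (b + 1) (b + 1) := by
    rw [triUpTo]
    apply List.flatMap_congr
    intro i hi
    rw [triRow]
    congr 1
    apply List.filter_congr
    intro j hj
    rw [PySem.List.mem_pyRange_one] at hi hj
    rw [hs i (by rw [PySem.List.mem_pyRange_one]; omega),
      hs j (by rw [PySem.List.mem_pyRange_one]; omega)]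
  rw [hR]
  have hfun : sigma = sum_divisors := funext sigma_eq_sum_divisors
  rw [hfun]
  by_cases h : a ≤ b + 1
  · have := outer_loop sum_divisors a (b + 1) a le_rfl h
    rw [show triUpTo sum_divisors a (b + 1) a = [] from by
      rw [triUpTo, PySem.List.pyRange_one_eq_nil le_rfl]; rfl] at this
    exact this
  · rw [PySem.List.pyRange_one_eq_nil (by omega), triUpTo,
      PySem.List.pyRange_one_eq_nil (by omega)]
    rfl
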